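-- pv_equiv track=rewrite | github.com/SapienzaNLP/unify-srl | srl/evaluate_conll2012.py | fix_spans
-- ===== SOURCE A (Python) =====
-- def fix_spans(predicate_index, roles):
--     for i in range(len(roles)):
--         if i == predicate_index:
--             roles[i] = 'B-V'
--             continue
--
--         if i != predicate_index and roles[i][2:] == 'V':
--             roles[i] = '_'
--
--         role = roles[i]
--         if role == '_':
--             continue
--
--         bio = role[0]
--         role = role[2:]
--         if bio == 'I':
--             if i == 0 or roles[i-1] == '_':
--                 roles[i] = 'B-{}'.format(role)
--             elif roles[i-1][0] == 'I' and roles[i-1][2:] != role: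
--                 roles[i] = roles[i-1]
--     return roles
-- ===== SOURCE B (Python) =====
-- def _fix_run(before, seg):
--     # Fix one maximal block of consecutive 'I'-labels as a whole, given the
--     # label standing immediately before the block ('_' at sentence start).
--     if before == '_':
--         head, rest = ['B-' + seg[0][2:]], seg[1:]
--     else:
--         head, rest = [], seg
--     if not rest:
--         return head
--     out = [rest[0]]
--     x0 = rest[0][2:]
--     for s in rest[1:]:
--         out.append(s if s[2:] == x0 else out[-1])
--     return head + out
--
--
-- def fix_spans(predicate_index, roles):
--     # stage 1: per-position normalization, independent of neighbours
--     norm = ['B-V' if i == predicate_index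
--             else '_' if r == '_' or r[2:] == 'V'
--             else r
--             for i, r in enumerate(roles)]
--     # stage 2: scan by maximal runs of 'I'-labels and fix each run at once
--     out = []
--     k, n, before = 0, len(norm), '_'
--     while k < n:
--         if norm[k][:1] != 'I':
--             out.append(norm[k])
--             before = norm[k]
--             k += 1
--         else:
--             j = k
--             while j < n and norm[j][:1] == 'I':
--                 j += 1
--             out.extend(_fix_run(before, norm[k:j]))
--             before = norm[j - 1]
--             k = j
--     roles[:] = out
--     return roles
-- ===== Notes on version B (the rewrite author's own statement) =====
-- stated objective: alternative
-- what changed: B replaces A's single in-place pass conditioned on the previously-mutated element by two stages: a per-position normalization comprehension (predicate/'V'/'_' handling, independent of neighbours) followed by a run-based scan that splits the normalized list into maximal blocks of consecutive 'I'-labels and fixes each whole block at once from the one label preceding the block.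
import Mathlib
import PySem

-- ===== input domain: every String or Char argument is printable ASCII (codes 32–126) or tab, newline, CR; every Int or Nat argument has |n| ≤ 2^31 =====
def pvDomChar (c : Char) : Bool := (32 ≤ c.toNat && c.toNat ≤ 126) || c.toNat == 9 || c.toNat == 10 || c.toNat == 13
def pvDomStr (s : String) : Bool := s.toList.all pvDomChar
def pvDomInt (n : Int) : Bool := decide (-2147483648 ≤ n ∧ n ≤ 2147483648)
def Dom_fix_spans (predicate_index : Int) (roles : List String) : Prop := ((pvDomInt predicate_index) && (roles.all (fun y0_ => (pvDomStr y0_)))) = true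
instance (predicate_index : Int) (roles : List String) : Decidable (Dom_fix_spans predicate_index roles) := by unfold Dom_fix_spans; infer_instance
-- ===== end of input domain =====

-- B replaces A's single in-place pass conditioned on the previously-mutated element by two
-- stages: a per-position normalization map plus a run-based scan fixing each maximal block of
-- 'I'-labels at once; same return value. A mutates `roles` in place and B reproduces that
-- mutation via `roles[:] = out`; the equivalence proved here is about the return value.

-- string concatenation ('B-{}'.format(role) in A, 'B-' + role[2:] in B)
def pvCat (s t : String) : String := String.ofList (s.toList ++ t.toList)

-- ===== PORT A =====
def fix_spans_step (predicate_index : Int) (rs : List String) (i : Nat) : List String :=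
  if (i : Int) = predicate_index then rs.set i "B-V" else
  let rs := if PySem.Str.slice (rs.getD i "") (some 2) none = "V" then rs.set i "_" else rs
  let role := rs.getD i ""
  if role = "_" then rs
  else
    -- role[0]; Python raises IndexError when role = "" — those inputs are outside Pre_
    let bio := (PySem.Str.pyGet? role 0).getD ' '
    let role2 := PySem.Str.slice role (some 2) none
    if bio = 'I' then
      if i = 0 ∨ rs.getD (i - 1) "" = "_" then rs.set i (pvCat "B-" role2)
      else if (PySem.Str.pyGet? (rs.getD (i - 1) "") 0).getD ' ' = 'I'
              ∧ PySem.Str.slice (rs.getD (i - 1) "") (some 2) none ≠ role2 then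
        rs.set i (rs.getD (i - 1) "")
      else rs
    else rs

def fix_spans (predicate_index : Int) (roles : List String) : List String :=
  (List.range roles.length).foldl (fix_spans_step predicate_index) roles

-- ===== PORT B =====
-- stage-1 normalization of one (index, label) pair (B's list comprehension body)
def pvNormOne (predicate_index : Int) (p : Int × String) : String :=
  if p.1 = predicate_index then "B-V"
  else if p.2 = "_" ∨ PySem.Str.slice p.2 (some 2) none = "V" then "_"
  else p.2

def pvIsI (s : String) : Bool := PySem.Str.slice s none (some 1) == "I"

-- the inner loop of _fix_run: `out.append(s if s[2:] == x0 else out[-1])`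
def pvChain (x0 : String) : String → List String → List String
  | _, [] => []
  | last, s :: ss =>
      let e := if PySem.Str.slice s (some 2) none = x0 then s else last
      e :: pvChain x0 e ss

-- _fix_run: fix one maximal block of consecutive 'I'-labels given the label before it
def pvFixRun (before : String) (seg : List String) : List String :=
  let p := if before = "_"
    then ([pvCat "B-" (PySem.Str.slice (seg.headD "") (some 2) none)], seg.tail)
    else (([] : List String), seg)
  match p.2 with
  | [] => p.1
  | r0 :: rs => p.1 ++ r0 :: pvChain (PySem.Str.slice r0 (some 2) none) r0 rs

-- stage-2 while loop: consume one non-'I' label, or one whole run of 'I'-labels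
def pvStage2 (before : String) : List String → List String
  | [] => []
  | r :: rest =>
    if pvIsI r then
      pvFixRun before (r :: rest.takeWhile pvIsI)
        ++ pvStage2 ((rest.takeWhile pvIsI).getLastD r) (rest.dropWhile pvIsI)
    else r :: pvStage2 r rest
termination_by l => l.length
decreasing_by
  · exact Nat.lt_succ_of_le (List.length_dropWhile_le _ _)
  · simp

def fix_spans_alt (predicate_index : Int) (roles : List String) : List String :=
  pvStage2 "_" ((PySem.List.enumerate roles 0).map (pvNormOne predicate_index))

-- ===== PRECONDITION & SPEC =====
-- Pre_ excludes exactly the inputs where Python A raises IndexError: an empty-string label at a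
-- position other than predicate_index (role[0] on '').
def Pre_fix_spans (predicate_index : Int) (roles : List String) : Prop :=
  ∀ i ∈ List.range roles.length, roles.getD i "" = "" → (i : Int) = predicate_index
instance (predicate_index : Int) (roles : List String) : Decidable (Pre_fix_spans predicate_index roles) := by
  unfold Pre_fix_spans; infer_instance
def pvWitness_fix_spans : Int × List String := (1, ["B-ARG0", "I-ARG0", "_", "I-ARG1"])

def Spec_fix_spans (predicate_index : Int) (roles : List String) (out : List String) : Prop := out = fix_spans_alt predicate_index roles
instance (predicate_index : Int) (roles : List String) (out : List String) : Decidable (Spec_fix_spans predicate_index roles out) := by unfold Spec_fix_spans; infer_instance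

-- ===== CLAIM (what is proved, stated in full; the proofs are below) =====
def Claim_equal_fix_spans : Prop := ∀ (predicate_index : Int) (roles : List String), Dom_fix_spans predicate_index roles → Pre_fix_spans predicate_index roles → Spec_fix_spans predicate_index roles (fix_spans predicate_index roles)

-- ===== LEMMAS AND PROOFS =====

-- A's per-step emitted label, as a pure function of (index, previous fixed label, raw label)
def pvFixedLabel (predicate_index : Int) (i : Int) (prev role : String) : String :=
  if i = predicate_index then "B-V"
  else if role = "_" ∨ PySem.Str.slice role (some 2) none = "V" then "_"
  else if PySem.Str.slice role none (some 1) = "I" then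
    if prev = "_" then pvCat "B-" (PySem.Str.slice role (some 2) none)
    else if PySem.Str.slice prev none (some 1) = "I"
            ∧ PySem.Str.slice prev (some 2) none ≠ PySem.Str.slice role (some 2) none then prev
    else role
  else role

-- the sequence of labels A emits, as a structural recursion threading the previous fixed label
def pvRun (predicate_index : Int) (i : Int) (prev : String) : List String → List String
  | [] => []
  | r :: rest => pvFixedLabel predicate_index i prev r :: pvRun predicate_index (i + 1) (pvFixedLabel predicate_index i prev r) rest

-- stage-1 normalization with an index accumulator (proof-side view of B's comprehension)
def pvNorm (predicate_index : Int) (i : Int) : List String → List String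
  | [] => []
  | r :: rest => pvNormOne predicate_index (i, r) :: pvNorm predicate_index (i + 1) rest

lemma pvString_eq_iff (s t : String) : s = t ↔ s.toList = t.toList := by
  constructor
  · intro h; rw [h]
  · exact String.ext

lemma pvTake1_eq (role : String) :
    (PySem.Str.slice role none (some 1) = "I") ↔ ((PySem.Str.pyGet? role 0).getD ' ' = 'I') := by
  rw [pvString_eq_iff]
  simp only [pysem]
  cases role.toList with
  | nil => decide
  | cons c cs =>
      simp [PySem.List.slice]

lemma pvSet_len {α : Type} (done l : List α) (x v : α) :
    (done ++ x :: l).set done.length v = done ++ v :: l := by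
  induction done with
  | nil => simp
  | cons d ds ih => simp [ih]

lemma pvSet_len1 {α : Type} (dn l : List α) (p x v : α) :
    (dn ++ p :: x :: l).set (dn.length + 1) v = dn ++ p :: v :: l := by
  induction dn with
  | nil => simp
  | cons d ds ih => simp [ih]

lemma pvGetE_len {α : Type} (done l : List α) (x d : α) :
    (done ++ x :: l)[done.length]?.getD d = x := by
  simp

set_option maxHeartbeats 2000000 in
lemma pvStep_eq (predicate_index : Int) (done rest : List String) (r : String) :
    fix_spans_step predicate_index (done ++ r :: rest) done.length
      = done ++ pvFixedLabel predicate_index (done.length : Int) (done.getLastD "_") r :: rest := by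
  by_cases hpi : (done.length : Int) = predicate_index
  · simp only [fix_spans_step, pvFixedLabel]
    simp [pysem, hpi, pvSet_len, pvSet_len1, pvGetE_len]
  by_cases hV : PySem.Str.slice r (some 2) none = "V"
  · simp only [fix_spans_step, pvFixedLabel]
    simp [pysem, hpi, hV, pvSet_len, pvSet_len1, pvGetE_len]
  by_cases h_ : r = "_"
  · simp only [fix_spans_step, pvFixedLabel]
    simp [pysem, hpi, hV, h_, pvSet_len, pvSet_len1, pvGetE_len]
  by_cases hI : PySem.Str.slice r none (some 1) = "I"
  · have hbio : (PySem.Str.pyGet? r 0).getD ' ' = 'I' := (pvTake1_eq r).mp hI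
    simp only [pysem] at hbio
    rcases List.eq_nil_or_concat done with hd | ⟨dn, p, hd⟩
    · subst hd
      have hpi' : ¬ ((0 : Int) = predicate_index) := by simpa using hpi
      simp only [fix_spans_step, pvFixedLabel]
      simp [pysem, hpi', hV, h_, hI, hbio, pvSet_len, pvSet_len1, pvGetE_len]
    · subst hd
      have hpi' : ¬ ((dn.length : Int) + 1 = predicate_index) := by
        simpa [List.length_concat] using hpi
      by_cases hp : p = "_"
      · simp only [fix_spans_step, pvFixedLabel]
        simp [pysem, hpi', hV, h_, hI, hbio, hp, pvSet_len, pvSet_len1, pvGetE_len,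
              List.getLastD_concat]
      · by_cases hpI : PySem.Str.slice p none (some 1) = "I"
        · have hpbio : (PySem.Str.pyGet? p 0).getD ' ' = 'I' := (pvTake1_eq p).mp hpI
          simp only [pysem] at hpbio
          by_cases hps : PySem.Str.slice p (some 2) none = PySem.Str.slice r (some 2) none
          · simp only [fix_spans_step, pvFixedLabel]
            simp [pysem, hpi', hV, h_, hI, hbio, hp, hpI, hpbio, hps, pvSet_len, pvSet_len1,
                  pvGetE_len, List.getLastD_concat]
          · simp only [fix_spans_step, pvFixedLabel]
            simp [pysem, hpi', hV, h_, hI, hbio, hp, hpI, hpbio, hps, pvSet_len, pvSet_len1,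
                  pvGetE_len, List.getLastD_concat]
        · have hpbio : ¬ (PySem.Str.pyGet? p 0).getD ' ' = 'I' := fun h => hpI ((pvTake1_eq p).mpr h)
          simp only [pysem] at hpbio
          simp only [fix_spans_step, pvFixedLabel]
          simp [pysem, hpi', hV, h_, hI, hbio, hp, hpI, hpbio, pvSet_len, pvSet_len1,
                pvGetE_len, List.getLastD_concat]
  · have hbio : ¬ (PySem.Str.pyGet? r 0).getD ' ' = 'I' := fun h => hI ((pvTake1_eq r).mpr h)
    simp only [pysem] at hbio
    simp only [fix_spans_step, pvFixedLabel]
    simp [pysem, hpi, hV, h_, hI, hbio, pvSet_len, pvSet_len1, pvGetE_len]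

lemma pvA_run (predicate_index : Int) :
    ∀ (rest done : List String),
      (List.range' done.length rest.length).foldl (fix_spans_step predicate_index) (done ++ rest)
        = done ++ pvRun predicate_index (done.length : Int) (done.getLastD "_") rest := by
  intro rest
  induction rest with
  | nil => intro done; simp [pvRun]
  | cons r rs ih =>
      intro done
      rw [List.length_cons, List.range'_succ, List.foldl_cons, pvStep_eq]
      have h := ih (done ++ [pvFixedLabel predicate_index (done.length : Int) (done.getLastD "_") r])
      simp only [List.length_append, List.length_cons, List.length_nil, Nat.zero_add,
        List.getLastD_concat, List.append_assoc, List.cons_append, List.nil_append] at h ⊢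
      rw [h, pvRun]
      push_cast
      simp

-- ---- bridging B's port to pvNorm ----
lemma pvEnumMap (predicate_index : Int) :
    ∀ (rs : List String) (s : Int),
      (PySem.List.enumerate rs s).map (pvNormOne predicate_index) = pvNorm predicate_index s rs := by
  intro rs
  induction rs with
  | nil => intro s; simp [PySem.List.enumerate, pvNorm]
  | cons r rest ih =>
      intro s
      rw [PySem.List.enumerate_cons, List.map_cons, ih, pvNorm]

-- ---- facts about normalization and labels ----
lemma pvIsI_norm (predicate_index i : Int) (r : String)
    (h : pvIsI (pvNormOne predicate_index (i, r)) = true) :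
    ¬ i = predicate_index ∧ ¬ (r = "_" ∨ PySem.Str.slice r (some 2) none = "V")
      ∧ pvNormOne predicate_index (i, r) = r ∧ PySem.Str.slice r none (some 1) = "I" := by
  unfold pvNormOne at h ⊢
  split_ifs at h ⊢ with h1 h2
  · exact absurd h (by decide)
  · exact absurd h (by decide)
  · simp only [pvIsI, beq_iff_eq] at h
    exact ⟨h1, h2, rfl, h⟩

lemma pvIsI_ne_underscore (s : String) (h : pvIsI s = true) : s ≠ "_" := by
  intro he; subst he; exact absurd h (by decide)

lemma pvIsI_iff (s : String) : pvIsI s = true ↔ PySem.Str.slice s none (some 1) = "I" := by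
  simp [pvIsI]

lemma pvCatB_not_I (x : String) : pvIsI (pvCat "B-" x) = false := by
  simp only [pvIsI, beq_eq_false_iff_ne, ne_eq, pvString_eq_iff]
  simp only [pysem, pvCat, String.toList_ofList]
  rw [PySem.List.slice_to]
  · show ¬ List.take (Int.toNat 1) (['B','-'] ++ x.toList) = ['I']
    simp
  · norm_num

lemma pvCatB_ne_underscore (x : String) : pvCat "B-" x ≠ "_" := by
  simp only [ne_eq, pvString_eq_iff]
  simp [pvCat]

-- non-'I' normalized labels are emitted by A unchanged, whatever the previous label is
lemma pvEmit_nonI (predicate_index i : Int) (r prev : String)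
    (h : pvIsI (pvNormOne predicate_index (i, r)) = false) :
    pvFixedLabel predicate_index i prev r = pvNormOne predicate_index (i, r) := by
  unfold pvFixedLabel
  by_cases h1 : i = predicate_index
  · simp [pvNormOne, h1]
  by_cases h2 : r = "_" ∨ PySem.Str.slice r (some 2) none = "V"
  · simp [pvNormOne, h1, h2]
  have hnr : pvNormOne predicate_index (i, r) = r := by simp [pvNormOne, h1, h2]
  rw [hnr] at h ⊢
  have h3 : ¬ PySem.Str.slice r none (some 1) = "I" := by
    intro hc
    rw [← pvIsI_iff r] at hc
    rw [h] at hc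
    exact Bool.false_ne_true hc
  rw [if_neg h1, if_neg h2, if_neg h3]

-- ---- the run lemma: A over a maximal 'I'-block, starting from an 'I' previous label,
--      equals pvChain followed by stage 2 on the remainder ----
lemma pvRL (predicate_index : Int) (n : Nat)
    (IH : ∀ rs', rs'.length ≤ n → ∀ (i : Int) (bf bn : String),
      (∀ r rest', rs' = r :: rest' → pvIsI (pvNormOne predicate_index (i, r)) = true →
        bf = bn ∧ pvIsI bn = false) →
      pvRun predicate_index i bf rs' = pvStage2 bn (pvNorm predicate_index i rs')) :
    ∀ (rest : List String), rest.length ≤ n → ∀ (i : Int) (last x0 q : String),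
      pvIsI last = true → PySem.Str.slice last (some 2) none = x0 →
      pvRun predicate_index i last rest =
        pvChain x0 last ((pvNorm predicate_index i rest).takeWhile pvIsI)
          ++ pvStage2 (((pvNorm predicate_index i rest).takeWhile pvIsI).getLastD q)
               ((pvNorm predicate_index i rest).dropWhile pvIsI) := by
  intro rest
  induction rest generalizing n with
  | nil => intro _ i last x0 q _ _; simp [pvRun, pvNorm, pvChain, pvStage2]
  | cons r rest' ihr =>
      intro hlen i last x0 q hlastI hlastx0
      rw [pvNorm]
      by_cases hI : pvIsI (pvNormOne predicate_index (i, r)) = true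
      · obtain ⟨hpi, hnv, hnr, hrI⟩ := pvIsI_norm predicate_index i r hI
        rw [hnr]
        have hrI' : pvIsI r = true := (pvIsI_iff r).mpr hrI
        rw [List.takeWhile_cons_of_pos hrI', List.dropWhile_cons_of_pos hrI']
        have hlast_ne : last ≠ "_" := pvIsI_ne_underscore last hlastI
        have hlastI' : PySem.Str.slice last none (some 1) = "I" := (pvIsI_iff last).mp hlastI
        have hemit : pvFixedLabel predicate_index i last r
            = (if PySem.Str.slice r (some 2) none = x0 then r else last) := by
          unfold pvFixedLabel
          rw [if_neg hpi, if_neg hnv, if_pos hrI, if_neg hlast_ne]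
          by_cases hx : PySem.Str.slice r (some 2) none = x0
          · rw [if_pos hx, if_neg]
            intro hc
            exact hc.2 (hlastx0.trans hx.symm)
          · rw [if_neg hx, if_pos ⟨hlastI', fun he => hx (he ▸ hlastx0)⟩]
        have heI : pvIsI (pvFixedLabel predicate_index i last r) = true := by
          rw [hemit]; split_ifs with hx
          · exact hrI'
          · exact hlastI
        have hex0 : PySem.Str.slice (pvFixedLabel predicate_index i last r) (some 2) none = x0 := by
          rw [hemit]; split_ifs with hx
          · exact hx
          · exact hlastx0
        rw [pvRun, pvChain, ← hemit]
        rw [ihr n IH (by simpa using Nat.le_of_succ_le hlen) (i + 1)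
              (pvFixedLabel predicate_index i last r) x0 r heI hex0]
        rw [List.getLastD_cons, List.cons_append]
      · have hI' : pvIsI (pvNormOne predicate_index (i, r)) = false := by
          simpa using hI
        rw [List.takeWhile_cons_of_neg (by simp [hI']), List.dropWhile_cons_of_neg (by simp [hI'])]
        rw [pvChain.eq_def]
        simp only [List.nil_append, List.getLastD_nil]
        rw [← pvNorm]
        exact IH (r :: rest') hlen i last q (fun r0 rest0 heq h0 => by
          obtain ⟨h1, h2⟩ := List.cons.inj heq
          subst h1
          exact absurd h0 (by simp [hI']))

-- ---- the main lemma: A's threaded pass equals stage 2 over the normalized list ----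
lemma pvML (predicate_index : Int) :
    ∀ (n : Nat) (rs : List String), rs.length ≤ n → ∀ (i : Int) (bf bn : String),
      (∀ r rest', rs = r :: rest' → pvIsI (pvNormOne predicate_index (i, r)) = true →
        bf = bn ∧ pvIsI bn = false) →
      pvRun predicate_index i bf rs = pvStage2 bn (pvNorm predicate_index i rs) := by
  intro n
  induction n with
  | zero =>
      intro rs hlen i bf bn _
      match rs, hlen with
      | [], _ => simp [pvRun, pvNorm, pvStage2]
  | succ m ihm =>
      intro rs hlen i bf bn hyp
      match rs with
      | [] => simp [pvRun, pvNorm, pvStage2]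
      | r :: rest =>
        have hrest : rest.length ≤ m := by simpa using Nat.le_of_succ_le_succ hlen
        rw [pvNorm]
        by_cases hI : pvIsI (pvNormOne predicate_index (i, r)) = true
        · obtain ⟨hbf_eq, hbnI⟩ := hyp r rest rfl hI
          subst hbf_eq
          obtain ⟨hpi, hnv, hnr, hrI⟩ := pvIsI_norm predicate_index i r hI
          have hrI' : pvIsI r = true := (pvIsI_iff r).mpr hrI
          rw [hnr, pvStage2, if_pos hrI']
          rw [pvRun]
          by_cases hun : bf = "_"
          · subst hun
            have hemit : pvFixedLabel predicate_index i "_" r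
                = pvCat "B-" (PySem.Str.slice r (some 2) none) := by
              unfold pvFixedLabel
              rw [if_neg hpi, if_neg hnv, if_pos hrI, if_pos rfl]
            rw [hemit]
            -- the rest of the sentence, starting after the fresh 'B-' label
            have hrl0 : pvRun predicate_index (i + 1)
                  (pvCat "B-" (PySem.Str.slice r (some 2) none)) rest =
                (match (pvNorm predicate_index (i + 1) rest).takeWhile pvIsI with
                  | [] => []
                  | r0 :: rs0 => r0 :: pvChain (PySem.Str.slice r0 (some 2) none) r0 rs0)
                ++ pvStage2 (((pvNorm predicate_index (i + 1) rest).takeWhile pvIsI).getLastD r)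
                     ((pvNorm predicate_index (i + 1) rest).dropWhile pvIsI) := by
              match rest, hrest with
              | [], _ => simp [pvRun, pvNorm, pvStage2]
              | r1 :: rest1, hrest =>
                rw [pvNorm]
                by_cases hI1 : pvIsI (pvNormOne predicate_index (i + 1, r1)) = true
                · obtain ⟨hpi1, hnv1, hnr1, hrI1⟩ := pvIsI_norm predicate_index (i + 1) r1 hI1
                  rw [hnr1]
                  have hrI1' : pvIsI r1 = true := (pvIsI_iff r1).mpr hrI1
                  rw [List.takeWhile_cons_of_pos hrI1', List.dropWhile_cons_of_pos hrI1']
                  have hemit1 : pvFixedLabel predicate_index (i + 1)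
                        (pvCat "B-" (PySem.Str.slice r (some 2) none)) r1 = r1 := by
                    unfold pvFixedLabel
                    rw [if_neg hpi1, if_neg hnv1, if_pos hrI1,
                        if_neg (pvCatB_ne_underscore _), if_neg]
                    intro hc
                    have := (pvIsI_iff _).mpr hc.1
                    rw [pvCatB_not_I] at this
                    exact Bool.false_ne_true this
                  rw [pvRun, hemit1]
                  rw [pvRL predicate_index m (fun rs' h' => ihm rs' h')
                        rest1 (by simpa using Nat.le_of_succ_le hrest) (i + 1 + 1) r1
                        (PySem.Str.slice r1 (some 2) none) r1 hrI1' rfl]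
                  rw [List.getLastD_cons]
                  simp
                · have hI1' : pvIsI (pvNormOne predicate_index (i + 1, r1)) = false := by
                    simpa using hI1
                  rw [List.takeWhile_cons_of_neg (by simp [hI1']),
                      List.dropWhile_cons_of_neg (by simp [hI1'])]
                  simp only [List.nil_append, List.getLastD_nil]
                  rw [← pvNorm]
                  exact ihm (r1 :: rest1) hrest (i + 1)
                    (pvCat "B-" (PySem.Str.slice r (some 2) none)) r
                    (fun r0 rest0 heq h0 => by
                      obtain ⟨h1, h2⟩ := List.cons.inj heq
                      subst h1
                      exact absurd h0 (by simp [hI1']))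
            rw [hrl0, pvFixRun]
            simp only [if_pos rfl, List.headD_cons, List.tail_cons]
            match hm : (pvNorm predicate_index (i + 1) rest).takeWhile pvIsI with
            | [] => simp
            | r0 :: rs0 => simp
          · have hemit : pvFixedLabel predicate_index i bf r = r := by
              unfold pvFixedLabel
              rw [if_neg hpi, if_neg hnv, if_pos hrI, if_neg hun, if_neg]
              intro hc
              have := (pvIsI_iff _).mpr hc.1
              rw [hbnI] at this
              exact Bool.false_ne_true this
            rw [hemit]
            rw [pvRL predicate_index m (fun rs' h' => ihm rs' h')
                  rest hrest (i + 1) r (PySem.Str.slice r (some 2) none) r hrI' rfl]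
            rw [pvFixRun]
            simp only [if_neg hun]
            simp
        · have hI' : pvIsI (pvNormOne predicate_index (i, r)) = false := by simpa using hI
          rw [pvStage2, if_neg (by simp [hI'])]
          rw [pvRun, pvEmit_nonI predicate_index i r bf hI']
          congr 1
          exact ihm rest hrest (i + 1) (pvNormOne predicate_index (i, r))
            (pvNormOne predicate_index (i, r))
            (fun r0 rest0 heq h0 => ⟨rfl, hI'⟩)

-- ===== VERDICT (by name: the statement is the Claim_ definition above) =====
theorem fix_spans_spec : Claim_equal_fix_spans := by
  intro predicate_index roles _ _
  unfold Spec_fix_spans fix_spans fix_spans_alt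
  rw [List.range_eq_range']
  have hA := pvA_run predicate_index roles []
  simp only [List.length_nil, List.nil_append, List.getLastD_nil] at hA
  rw [hA, pvEnumMap]
  exact pvML predicate_index roles.length roles le_rfl 0 "_" "_"
    (fun r rest' heq h0 => ⟨rfl, by decide⟩)
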